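-- pv_equiv track=rewrite | github.com/tianbot/tianracer | tianracer_gazebo/scripts/follow_the_gap.py | get_gap
-- ===== SOURCE A (Python) =====
-- def get_gap(dis_list, threshold):
--     lis = [1 if a > threshold else 0 for a in dis_list]
--     tmp = 0
--     ans_list = []
--     for i in lis:
--         if i == 0 :
--             tmp = 0
--             ans_list.append(0)
--         else:
--             tmp +=1
--             ans_list.append(tmp)
--     return ans_list
-- ===== SOURCE B (Python) =====
-- def get_gap(dis_list, threshold):
--     # run-length traversal: split into maximal runs of same above/below status
--     out = []
--     i, n = 0, len(dis_list)
--     while i < n: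
--         key = dis_list[i] > threshold
--         j = i + 1
--         while j < n and (dis_list[j] > threshold) == key:
--             j += 1
--         run = j - i
--         out.extend(range(1, run + 1) if key else [0] * run)
--         i = j
--     return out
-- ===== Notes on version B (the rewrite author's own statement) =====
-- stated objective: alternative
-- what changed: Replaces the element-by-element running-counter-with-reset loop by a run-length traversal: the list is split into maximal runs of equal above/below-threshold status, and each run emits [0]*n or range(1, n+1) at once.
import Mathlib
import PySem

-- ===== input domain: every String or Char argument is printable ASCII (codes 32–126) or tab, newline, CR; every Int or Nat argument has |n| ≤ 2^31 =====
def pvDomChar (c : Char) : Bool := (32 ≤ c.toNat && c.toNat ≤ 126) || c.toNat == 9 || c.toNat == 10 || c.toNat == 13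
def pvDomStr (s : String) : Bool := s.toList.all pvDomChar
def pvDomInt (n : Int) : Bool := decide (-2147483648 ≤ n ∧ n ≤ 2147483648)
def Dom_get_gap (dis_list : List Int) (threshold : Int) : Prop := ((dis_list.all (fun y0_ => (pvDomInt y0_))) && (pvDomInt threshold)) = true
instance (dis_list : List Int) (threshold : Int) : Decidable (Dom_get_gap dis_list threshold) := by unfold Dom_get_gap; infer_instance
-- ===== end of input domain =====

-- B replaces A's running-counter-with-reset loop by a run-length traversal over maximal
-- constant-status runs (alternative decomposition, same cost).


-- ===== PORT A =====
-- literal port of A: build lis of 0/1 flags, then fold A's loop state (tmp, ans_list)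
def get_gap (dis_list : List Int) (threshold : Int) : List Int :=
  let lis := dis_list.map (fun a => if a > threshold then (1 : Int) else 0)
  (lis.foldl
    (fun (st : Int × List Int) i =>
      if i = 0 then (0, st.2 ++ [0]) else (st.1 + 1, st.2 ++ [st.1 + 1]))
    (0, [])).2

-- ===== PORT B =====
-- literal port of B's outer while-loop: peel off one maximal run per step
def get_gap_altGo (threshold : Int) : List Int → List Int
  | [] => []
  | a :: rest =>
    let key := decide (a > threshold)
    let pre := rest.takeWhile (fun x => decide (x > threshold) == key)
    let post := rest.dropWhile (fun x => decide (x > threshold) == key)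
    let run := pre.length + 1
    (if key then (List.range run).map (fun k : Nat => (k : Int) + 1)
     else List.replicate run 0) ++ get_gap_altGo threshold post
termination_by xs => xs.length
decreasing_by
  simpa using Nat.lt_succ_of_le (List.length_dropWhile_le _ rest)

def get_gap_alt (dis_list : List Int) (threshold : Int) : List Int :=
  get_gap_altGo threshold dis_list

-- ===== PRECONDITION & SPEC =====
def Spec_get_gap (dis_list : List Int) (threshold : Int) (out : List Int) : Prop := out = get_gap_alt dis_list threshold
instance (dis_list : List Int) (threshold : Int) (out : List Int) : Decidable (Spec_get_gap dis_list threshold out) := by unfold Spec_get_gap; infer_instance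

-- ===== CLAIM (what is proved, stated in full; the proofs are below) =====
def Claim_equal_get_gap : Prop := ∀ (dis_list : List Int) (threshold : Int), Dom_get_gap dis_list threshold → Spec_get_gap dis_list threshold (get_gap dis_list threshold)

-- ===== LEMMAS AND PROOFS =====

-- A's loop, as a structural recursion over the original values with the running counter tmp
def gA (threshold tmp : Int) : List Int → List Int
  | [] => []
  | a :: xs => if a > threshold then (tmp + 1) :: gA threshold (tmp + 1) xs
               else 0 :: gA threshold 0 xs

theorem foldl_eq_gA (threshold : Int) (xs : List Int) :
    ∀ (tmp : Int) (acc : List Int),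
      ((xs.map (fun a => if a > threshold then (1 : Int) else 0)).foldl
        (fun (st : Int × List Int) i =>
          if i = 0 then (0, st.2 ++ [0]) else (st.1 + 1, st.2 ++ [st.1 + 1]))
        (tmp, acc)).2 = acc ++ gA threshold tmp xs := by
  induction xs with
  | nil => simp [gA]
  | cons a xs ih =>
    intro tmp acc
    by_cases h : a > threshold
    · simp only [List.map_cons, List.foldl_cons, if_pos h, if_neg one_ne_zero, ih, gA, if_pos h]
      simp
    · simp only [List.map_cons, List.foldl_cons, if_neg h, if_pos rfl, ih, gA]
      simp [h]

theorem get_gap_eq_gA (dis_list : List Int) (threshold : Int) :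
    get_gap dis_list threshold = gA threshold 0 dis_list := by
  simpa [get_gap] using foldl_eq_gA threshold dis_list 0 []

-- a range of length n+1 splits off its first element
theorem range_succ_map_int (n : ℕ) (f : ℕ → Int) :
    (List.range (n + 1)).map f = f 0 :: (List.range n).map (fun k => f (k + 1)) := by
  rw [List.range_succ_eq_map, List.map_cons, List.map_map]
  rfl

-- the head of a dropWhile fails the predicate
theorem dropWhile_head_false {α : Type} (p : α → Bool) :
    ∀ (l : List α) (y : α) (t : List α), l.dropWhile p = y :: t → p y = false := by
  intro l
  induction l with
  | nil => simp [List.dropWhile]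
  | cons a l ih =>
    intro y t hyt
    by_cases hpa : p a
    · rw [List.dropWhile_cons_of_pos hpa] at hyt
      exact ih y t hyt
    · rw [List.dropWhile_cons_of_neg hpa] at hyt
      cases hyt
      simpa using hpa

-- after a non-positive boundary (or the end), the counter value is irrelevant
theorem gA_reset (threshold : Int) (post : List Int)
    (hpost : ∀ y t, post = y :: t → ¬ y > threshold) :
    ∀ tmp, gA threshold tmp post = gA threshold 0 post := by
  intro tmp
  cases post with
  | nil => rfl
  | cons y t => simp [gA, hpost y t rfl]

-- an above-threshold run counts up from tmp+1
theorem gA_pos_run (threshold : Int) (pre : List Int)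
    (hpre : ∀ x ∈ pre, x > threshold) (post : List Int)
    (hpost : ∀ y t, post = y :: t → ¬ y > threshold) :
    ∀ tmp, gA threshold tmp (pre ++ post) =
      (List.range pre.length).map (fun k : Nat => tmp + (k : Int) + 1) ++ gA threshold 0 post := by
  induction pre with
  | nil => intro tmp; simpa using gA_reset threshold post hpost tmp
  | cons x pre ih =>
    intro tmp
    have hx : x > threshold := hpre x (by simp)
    have ih' := ih (fun y hy => hpre y (by simp [hy])) (tmp + 1)
    simp only [List.cons_append, gA, if_pos hx, ih', List.length_cons]
    rw [range_succ_map_int]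
    simp only [List.cons_append]
    refine List.cons_eq_cons.mpr ⟨by norm_num, ?_⟩
    refine congrArg₂ _ ?_ rfl
    apply List.map_congr_left
    intro k _
    push_cast
    ring

-- a non-positive run emits zeros and leaves the counter reset
theorem gA_neg_run (threshold : Int) (pre : List Int)
    (hpre : ∀ x ∈ pre, ¬ x > threshold) (post : List Int) :
    gA threshold 0 (pre ++ post) =
      List.replicate pre.length 0 ++ gA threshold 0 post := by
  induction pre with
  | nil => simp
  | cons x pre ih =>
    have hx : ¬ x > threshold := hpre x (by simp)
    simp [gA, hx, ih (fun y hy => hpre y (by simp [hy])), List.replicate_succ]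

theorem gA_eq_altGo (threshold : Int) : ∀ xs, gA threshold 0 xs = get_gap_altGo threshold xs
  | [] => by rw [get_gap_altGo]; rfl
  | a :: rest => by
    rw [get_gap_altGo]
    by_cases h : a > threshold
    · have hd : decide (a > threshold) = true := by simp [h]
      simp only [hd, if_true]
      set p : Int → Bool := fun x => decide (x > threshold) == true with hp
      have hsplit : rest = rest.takeWhile p ++ rest.dropWhile p :=
        (List.takeWhile_append_dropWhile).symm
      have hpre : ∀ x ∈ rest.takeWhile p, x > threshold := by
        intro x hx
        have := List.mem_takeWhile_imp hx
        simpa [hp] using this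
      have hpost : ∀ y t, rest.dropWhile p = y :: t → ¬ y > threshold := by
        intro y t hyt
        have := dropWhile_head_false p rest y t hyt
        simpa [hp] using this
      have hrw : gA threshold 1 rest =
          (List.range (rest.takeWhile p).length).map (fun k : Nat => 1 + (k : Int) + 1) ++
            gA threshold 0 (rest.dropWhile p) := by
        conv_lhs => rw [hsplit]
        exact gA_pos_run threshold _ hpre _ hpost 1
      have step : gA threshold 0 (a :: rest) = 1 :: gA threshold 1 rest := by
        simp [gA, h]
      rw [step, hrw, gA_eq_altGo threshold (rest.dropWhile p), range_succ_map_int,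
        List.cons_append]
      refine List.cons_eq_cons.mpr ⟨by norm_num, ?_⟩
      refine congrArg₂ _ ?_ rfl
      apply List.map_congr_left
      intro k _
      push_cast
      ring
    · have hd : decide (a > threshold) = false := by simp [h]
      simp only [hd, if_false]
      set p : Int → Bool := fun x => decide (x > threshold) == false with hp
      have hsplit : rest = rest.takeWhile p ++ rest.dropWhile p :=
        (List.takeWhile_append_dropWhile).symm
      have hpre : ∀ x ∈ rest.takeWhile p, ¬ x > threshold := by
        intro x hx
        have := List.mem_takeWhile_imp hx
        simpa [hp] using this
      have hrw : gA threshold 0 rest =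
          List.replicate (rest.takeWhile p).length 0 ++ gA threshold 0 (rest.dropWhile p) := by
        conv_lhs => rw [hsplit]
        exact gA_neg_run threshold _ hpre _
      have step : gA threshold 0 (a :: rest) = 0 :: gA threshold 0 rest := by
        simp [gA, h]
      rw [step, hrw, gA_eq_altGo threshold (rest.dropWhile p)]
      simp [List.replicate_succ]
termination_by xs => xs.length
decreasing_by
  all_goals simpa using Nat.lt_succ_of_le (List.length_dropWhile_le _ rest)

-- ===== VERDICT (by name: the statement is the Claim_ definition above) =====
theorem get_gap_spec : Claim_equal_get_gap := by
  intro dis_list threshold _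
  unfold Spec_get_gap get_gap_alt
  rw [get_gap_eq_gA, gA_eq_altGo]
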